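-- pv_equiv track=rewrite | github.com/Anushka-Sharma-008/PythonDSA | practice/12_Sandglass.py | generate_sandglass
-- ===== SOURCE A (Python) =====
-- def generate_sandglass(n):
--     """
--     Function to return a sandglass pattern of '*' of side n as a list of strings.
--
--     Parameters:
--     n (int): The height of the sandglass.
--
--     Returns:
--     list: A list of strings where each string represents a row of the sandglass pattern.
--     """
--     sandglass = []
--     # Upper part
--     for i in range(n):
--         stars = '*' * (2*(n-i)-1)
--         spaces = ' ' * i
--         sandglass.append(spaces + stars + spaces)
--
--     # Lower part
--     for i in range(n-1):
--         stars = '*' * (2*(i+1)+1)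
--         spaces = ' ' * (n-i-2)
--         sandglass.append(spaces + stars + spaces)
--     return sandglass
-- ===== SOURCE B (Python) =====
-- def generate_sandglass(n):
--     rows = []
--     for r in range(2 * n - 1):
--         d = abs(n - 1 - r)          # distance from the waist row
--         pad = ' ' * (n - 1 - d)
--         rows.append(pad + '*' * (2 * d + 1) + pad)
--     return rows
-- ===== Notes on version B (the rewrite author's own statement) =====
-- stated objective: simpler
-- what changed: B replaces A's two generative loops (upper part, then lower part with a separate index formula) by one loop over all 2n-1 rows, computing each row directly from its distance d=|n-1-r| to the waist.
import Mathlib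
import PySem

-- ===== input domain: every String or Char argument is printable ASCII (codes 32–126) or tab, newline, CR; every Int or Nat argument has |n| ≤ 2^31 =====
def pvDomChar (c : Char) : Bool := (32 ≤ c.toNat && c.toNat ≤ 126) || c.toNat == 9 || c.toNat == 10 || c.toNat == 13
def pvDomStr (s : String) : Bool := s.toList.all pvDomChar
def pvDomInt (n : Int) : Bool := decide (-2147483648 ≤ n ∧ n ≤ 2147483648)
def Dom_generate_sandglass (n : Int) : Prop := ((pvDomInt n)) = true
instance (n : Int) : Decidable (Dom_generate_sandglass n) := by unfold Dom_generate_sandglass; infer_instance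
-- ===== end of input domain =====

-- B replaces A's two loops by one loop over all 2n-1 rows, each row computed from its distance |n-1-r| to the waist (objective: simpler).

-- Python "c * k" for a single char c and int k: empty for k ≤ 0 (exact hand port of str repetition).
def srep (c : Char) (k : Int) : String := String.ofList (List.replicate k.toNat c)

-- ===== PORT A =====
def generate_sandglass (n : Int) : List String :=
  -- upper part
  let sandglass := (PySem.List.pyRange 0 n 1).foldl
    (fun acc i => acc ++ [srep ' ' i ++ srep '*' (2*(n-i)-1) ++ srep ' ' i]) []
  -- lower part
  (PySem.List.pyRange 0 (n-1) 1).foldl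
    (fun acc i => acc ++ [srep ' ' (n-i-2) ++ srep '*' (2*(i+1)+1) ++ srep ' ' (n-i-2)]) sandglass

-- ===== PORT B =====
def generate_sandglass_alt (n : Int) : List String :=
  (PySem.List.pyRange 0 (2*n-1) 1).foldl
    (fun acc r =>
      let d : Int := |n - 1 - r|
      acc ++ [srep ' ' (n-1-d) ++ srep '*' (2*d+1) ++ srep ' ' (n-1-d)]) []

-- ===== PRECONDITION & SPEC =====
def Spec_generate_sandglass (n : Int) (out : List String) : Prop := out = generate_sandglass_alt n
instance (n : Int) (out : List String) : Decidable (Spec_generate_sandglass n out) := by unfold Spec_generate_sandglass; infer_instance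

-- ===== CLAIM (what is proved, stated in full; the proofs are below) =====
def Claim_equal_generate_sandglass : Prop := ∀ (n : Int), Dom_generate_sandglass n → Spec_generate_sandglass n (generate_sandglass n)

-- ===== LEMMAS AND PROOFS =====

-- srep only depends on the clamped count
theorem srep_congr (c : Char) {a b : Int} (h : a.toNat = b.toNat) : srep c a = srep c b := by
  simp [srep, h]

-- A's two halves, written as maps, equal B's single map over all 2n-1 rows
theorem halves_eq_waist (n : Int) :
    (PySem.List.pyRange 0 n 1).map
      (fun i => srep ' ' i ++ srep '*' (2*(n-i)-1) ++ srep ' ' i)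
    ++ (PySem.List.pyRange 0 (n-1) 1).map
      (fun i => srep ' ' (n-i-2) ++ srep '*' (2*(i+1)+1) ++ srep ' ' (n-i-2))
    = (PySem.List.pyRange 0 (2*n-1) 1).map
      (fun r => srep ' ' (n-1-|n-1-r|) ++ srep '*' (2*|n-1-r|+1) ++ srep ' ' (n-1-|n-1-r|)) := by
  apply List.ext_getElem
  · simp [PySem.List.length_pyRange_one]; omega
  · intro k h1 h2
    have hk : k < (2*n-1).toNat := by
      simpa [PySem.List.length_pyRange_one] using h2
    rw [List.getElem_append]
    split_ifs with hlt <;>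
    · simp only [List.getElem_map, PySem.List.getElem_pyRange_one,
        List.length_map, PySem.List.length_pyRange_one, zero_add, sub_zero,
        Int.abs_eq_natAbs] at hlt ⊢
      congr 1
      · congr 1
        · exact srep_congr _ (by omega)
        · exact srep_congr _ (by omega)
      · exact srep_congr _ (by omega)

-- ===== VERDICT (by name: the statement is the Claim_ definition above) =====
theorem generate_sandglass_spec : Claim_equal_generate_sandglass := by
  intro n _
  unfold Spec_generate_sandglass generate_sandglass generate_sandglass_alt
  simp only [PySem.List.foldl_append_singleton_eq_map, List.nil_append]
  exact halves_eq_waist n
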